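-- pv_equiv track=rewrite | github.com/wolfatthegate/HybridCloudSim-SC2025 | utility_functions/test_device.py | has_reversed_pair
-- ===== SOURCE A (Python) =====
-- def has_reversed_pair(data):
--     pairs_set = set()
--
--     for pair in data:
--         p = tuple(pair)
--         if (p[1], p[0]) in pairs_set:
--             return True  # Reversed pair found
--         pairs_set.add(p)
--
--     return False  # No reversed pair found
-- ===== SOURCE B (Python) =====
-- def has_reversed_pair(data):
--     # Two-pass: build a frequency table of all pairs, then scan the distinct
--     # keys: a non-palindromic key (a, b) matches if (b, a) is also a key; a
--     # palindromic key (a, a) matches only if it occurs at least twice.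
--     counts = {}
--     for pair in data:
--         p = tuple(pair)
--         counts[p] = counts.get(p, 0) + 1
--     for (a, b) in counts:
--         if a != b:
--             if (b, a) in counts:
--                 return True
--         elif counts[(a, b)] >= 2:
--             return True
--     return False
-- ===== Notes on version B (the rewrite author's own statement) =====
-- stated objective: alternative
-- what changed: Replaces A's incremental seen-so-far single pass (early return when a pair's reverse was seen earlier) with a two-pass scheme: first build a frequency table of all pairs, then scan the distinct keys, matching a non-palindromic key (a,b) when (b,a) is also a key and a palindromic key (a,a) when its count is at least 2.
import Mathlib
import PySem

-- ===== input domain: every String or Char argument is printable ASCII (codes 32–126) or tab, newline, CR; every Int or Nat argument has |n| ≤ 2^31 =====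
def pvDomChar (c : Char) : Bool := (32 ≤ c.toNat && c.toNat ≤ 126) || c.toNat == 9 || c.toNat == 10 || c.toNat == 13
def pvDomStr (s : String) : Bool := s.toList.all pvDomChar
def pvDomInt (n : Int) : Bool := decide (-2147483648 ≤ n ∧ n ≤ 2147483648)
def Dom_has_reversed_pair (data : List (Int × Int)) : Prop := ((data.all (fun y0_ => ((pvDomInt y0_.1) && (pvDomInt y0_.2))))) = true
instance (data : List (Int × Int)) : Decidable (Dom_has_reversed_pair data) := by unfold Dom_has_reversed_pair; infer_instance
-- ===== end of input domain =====

-- B replaces A's incremental "seen so far" single pass by a two-pass scheme (frequency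
-- table of the pairs, then a scan of the distinct keys); objective: alternative, not faster.

-- ===== PORT A =====
-- the for-loop with early return, carrying the growing set `pairs_set`
def hrpLoopA : List (Int × Int) → PySem.Set (Int × Int) → Bool
  | [], _ => false
  | p :: rest, s =>
    if s.contains (p.2, p.1) then true
    else hrpLoopA rest (s.add p)

def has_reversed_pair (data : List (Int × Int)) : Bool :=
  hrpLoopA data PySem.Set.empty

-- ===== PORT B =====
def has_reversed_pair_alt (data : List (Int × Int)) : Bool :=
  -- counts[p] = counts.get(p, 0) + 1  (overwrite keeps position = Dict.modify)
  let counts := data.foldl (fun d p => d.modify p (0 : Int) (· + 1)) PySem.Dict.empty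
  -- the second for-loop over the dict's keys, with its early returns, is List.any
  counts.keys.any (fun p =>
    if p.1 ≠ p.2 then counts.contains (p.2, p.1)
    else decide (2 ≤ counts.getD p (0 : Int)))

-- ===== PRECONDITION & SPEC =====
def Spec_has_reversed_pair (data : List (Int × Int)) (out : Bool) : Prop := out = has_reversed_pair_alt data
instance (data : List (Int × Int)) (out : Bool) : Decidable (Spec_has_reversed_pair data out) := by unfold Spec_has_reversed_pair; infer_instance

-- ===== CLAIM (what is proved, stated in full; the proofs are below) =====
def Claim_equal_has_reversed_pair : Prop := ∀ (data : List (Int × Int)), Dom_has_reversed_pair data → Spec_has_reversed_pair data (has_reversed_pair data)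

-- ===== LEMMAS AND PROOFS =====

-- A's loop returns true iff some element’s reverse occurs in the seed set or earlier in the list
theorem hrpLoopA_iff (l : List (Int × Int)) (s : PySem.Set (Int × Int)) :
    hrpLoopA l s = true ↔
      ∃ xs p ys, l = xs ++ p :: ys ∧ ((p.2, p.1) ∈ s ∨ (p.2, p.1) ∈ xs) := by
  induction l generalizing s with
  | nil =>
    simp [hrpLoopA]
  | cons a t ih =>
    by_cases h : (a.2, a.1) ∈ s
    · have hc := (PySem.Set.contains_iff s (a.2, a.1)).mpr h
      constructor
      · intro _
        exact ⟨[], a, t, by simp, Or.inl h⟩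
      · intro _
        simp only [hrpLoopA]
        rw [hc]
        simp
    · have hc : s.contains (a.2, a.1) = false :=
        Bool.eq_false_iff.mpr (fun hx => h ((PySem.Set.contains_iff s (a.2, a.1)).mp hx))
      simp only [hrpLoopA, hc, Bool.false_eq_true, if_false]
      rw [ih]
      constructor
      · rintro ⟨xs, p, ys, rfl, hmem⟩
        refine ⟨a :: xs, p, ys, by simp, ?_⟩
        rcases hmem with hm | hm
        · rw [PySem.Set.mem_add] at hm
          rcases hm with hm | hm
          · exact Or.inl hm
          · exact Or.inr (by simp [hm])
        · exact Or.inr (by simp [hm])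
      · rintro ⟨xs, p, ys, heq, hmem⟩
        cases xs with
        | nil =>
          simp only [List.nil_append, List.cons.injEq] at heq
          rcases hmem with hm | hm
          · exact absurd (heq.1 ▸ hm) h
          · simp at hm
        | cons b xs' =>
          simp only [List.cons_append, List.cons.injEq] at heq
          obtain ⟨rfl, rfl⟩ := heq
          refine ⟨xs', p, ys, rfl, ?_⟩
          rcases hmem with hm | hm
          · exact Or.inl ((PySem.Set.mem_add s a (p.2, p.1)).mpr (Or.inl hm))
          · rcases List.mem_cons.mp hm with hm | hm
            · exact Or.inl ((PySem.Set.mem_add s a (p.2, p.1)).mpr (Or.inr hm))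
            · exact Or.inr hm

theorem hrpA_iff (data : List (Int × Int)) :
    has_reversed_pair data = true ↔
      ∃ xs p ys, data = xs ++ p :: ys ∧ (p.2, p.1) ∈ xs := by
  rw [has_reversed_pair, hrpLoopA_iff]
  constructor
  · rintro ⟨xs, p, ys, h, hm | hm⟩
    · exact absurd hm (by simp [PySem.Set.empty])
    · exact ⟨xs, p, ys, h, hm⟩
  · rintro ⟨xs, p, ys, h, hm⟩
    exact ⟨xs, p, ys, h, Or.inr hm⟩

theorem hrpB_iff (data : List (Int × Int)) :
    has_reversed_pair_alt data = true ↔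
      ∃ p ∈ data, if p.1 ≠ p.2 then (p.2, p.1) ∈ data else 2 ≤ data.count p := by
  have halt : has_reversed_pair_alt data
      = ((PySem.Dict.counter data).keys.any (fun p =>
          if p.1 ≠ p.2 then (PySem.Dict.counter data).contains (p.2, p.1)
          else decide (2 ≤ (PySem.Dict.counter data).getD p 0))) := by
    rw [has_reversed_pair_alt, PySem.Dict.counter_eq_foldl]
  rw [halt]
  simp only [PySem.Dict.keys_counter, List.any_eq_true]
  constructor
  · rintro ⟨p, hp, hcond⟩
    refine ⟨p, (PySem.Set.mem_ofList data p).mp hp, ?_⟩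
    by_cases hne : p.1 ≠ p.2
    · rw [if_pos hne]
      rw [if_pos hne, PySem.Dict.contains_counter] at hcond
      simpa using hcond
    · rw [if_neg hne]
      rw [if_neg hne, PySem.Dict.getD_counter] at hcond
      exact_mod_cast of_decide_eq_true hcond
  · rintro ⟨p, hp, hcond⟩
    refine ⟨p, (PySem.Set.mem_ofList data p).mpr hp, ?_⟩
    by_cases hne : p.1 ≠ p.2
    · rw [if_pos hne] at hcond
      rw [if_pos hne, PySem.Dict.contains_counter]
      simpa using hcond
    · rw [if_neg hne] at hcond
      rw [if_neg hne, PySem.Dict.getD_counter]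
      exact decide_eq_true (by exact_mod_cast hcond)

-- splitting a list at a later of two distinct members
theorem split_two_distinct {α : Type} (p q : α) :
    ∀ (l : List α), p ∈ l → q ∈ l → p ≠ q →
      ∃ xs c ys, l = xs ++ c :: ys ∧ ((c = p ∧ q ∈ xs) ∨ (c = q ∧ p ∈ xs)) := by
  intro l
  induction l with
  | nil => intro h; simp at h
  | cons a t ih =>
    intro hp hq hne
    by_cases hap : a = p
    · have hqt : q ∈ t := by
        rcases List.mem_cons.mp hq with h | h
        · exact absurd (hap ▸ h).symm hne
        · exact h
      obtain ⟨u, v, huv⟩ := List.append_of_mem hqt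
      exact ⟨a :: u, q, v, by simp [huv], Or.inr ⟨rfl, by simp [hap]⟩⟩
    · by_cases haq : a = q
      · have hpt : p ∈ t := by
          rcases List.mem_cons.mp hp with h | h
          · exact absurd h.symm hap
          · exact h
        obtain ⟨u, v, huv⟩ := List.append_of_mem hpt
        exact ⟨a :: u, p, v, by simp [huv], Or.inl ⟨rfl, by simp [haq]⟩⟩
      · have hpt : p ∈ t := by
          rcases List.mem_cons.mp hp with h | h
          · exact absurd h.symm hap
          · exact h
        have hqt : q ∈ t := by
          rcases List.mem_cons.mp hq with h | h
          · exact absurd h.symm haq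
          · exact h
        obtain ⟨xs, c, ys, heq, hc⟩ := ih hpt hqt hne
        refine ⟨a :: xs, c, ys, by simp [heq], ?_⟩
        rcases hc with ⟨h1, h2⟩ | ⟨h1, h2⟩
        · exact Or.inl ⟨h1, List.mem_cons_of_mem a h2⟩
        · exact Or.inr ⟨h1, List.mem_cons_of_mem a h2⟩

-- splitting a list at the second occurrence of a repeated member
theorem split_two_count {α : Type} [BEq α] [LawfulBEq α] (p : α) :
    ∀ (l : List α), 2 ≤ l.count p → ∃ xs ys, l = xs ++ p :: ys ∧ p ∈ xs := by
  intro l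
  induction l with
  | nil => intro h; simp at h
  | cons a t ih =>
    intro h
    by_cases hap : a = p
    · have h1 : 1 ≤ t.count p := by
        rw [List.count_cons, if_pos (by simp [hap])] at h
        omega
      obtain ⟨u, v, huv⟩ := List.append_of_mem (List.one_le_count_iff.mp h1)
      exact ⟨a :: u, v, by simp [huv], by simp [hap]⟩
    · have h2 : 2 ≤ t.count p := by
        rw [List.count_cons, if_neg (by simp [hap])] at h
        omega
      obtain ⟨xs, ys, heq, hmem⟩ := ih h2
      exact ⟨a :: xs, ys, by simp [heq], List.mem_cons_of_mem a hmem⟩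

-- ===== VERDICT (by name: the statement is the Claim_ definition above) =====
theorem has_reversed_pair_spec : Claim_equal_has_reversed_pair := by
  intro data _
  unfold Spec_has_reversed_pair
  have hiff : has_reversed_pair data = true ↔ has_reversed_pair_alt data = true := by
    rw [hrpA_iff, hrpB_iff]
    constructor
    · rintro ⟨xs, p, ys, rfl, hm⟩
      by_cases hne : p.1 ≠ p.2
      · refine ⟨p, by simp, ?_⟩
        rw [if_pos hne]
        exact List.mem_append.mpr (Or.inl hm)
      · have hne' : p.1 = p.2 := not_not.mp hne
        have hpp : (p.2, p.1) = p := by cases p; simp_all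
        refine ⟨p, by simp, ?_⟩
        rw [if_neg hne]
        have hmx : p ∈ xs := hpp ▸ hm
        have h1 : 1 ≤ xs.count p := List.one_le_count_iff.mpr hmx
        rw [List.count_append, List.count_cons_self]
        omega
    · rintro ⟨p, hp, hcond⟩
      by_cases hne : p.1 ≠ p.2
      · rw [if_pos hne] at hcond
        have hpq : p ≠ (p.2, p.1) := by
          intro h; apply hne; rw [Prod.ext_iff] at h; exact h.1
        obtain ⟨xs, c, ys, heq, hc⟩ := split_two_distinct p (p.2, p.1) data hp hcond hpq
        rcases hc with ⟨h1, hm⟩ | ⟨h1, hm⟩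
        · exact ⟨xs, c, ys, heq, by rw [h1]; exact hm⟩
        · exact ⟨xs, c, ys, heq, by rw [h1]; simpa using hm⟩
      · rw [if_neg hne] at hcond
        have hne' : p.1 = p.2 := not_not.mp hne
        obtain ⟨xs, ys, heq, hm⟩ := split_two_count p data hcond
        have hpp : (p.2, p.1) = p := by cases p; simp_all
        exact ⟨xs, p, ys, heq, hpp ▸ hm⟩
  cases hA : has_reversed_pair data <;> cases hB : has_reversed_pair_alt data <;> simp_all
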